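-- pv_equiv track=rewrite | github.com/23andMe/bonsaitree | bonsaitree/node_dict_tools.py | get_desc_deg_dict
-- ===== SOURCE A (Python) =====
-- from typing import Any, Dict, List, Set, Tuple
--
-- def get_desc_deg_dict(
--     anc_id : int,
--     node_dict : Dict[int, Dict[int, int]],
-- ) -> Dict[int, int]:
--     """
--     Return a dict with keys given by the descendants of anc_id
--     and values given by the degrees from anc_id down to them
--
--     Args:
--         anc_id: id of the ancestral individual
--         node_dict: a dict of the form { node : {desc1 : deg1, desc2 : deg2, ....} }
--                    node_dict skips omits nodes that are ancestral to only one person.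
--     """
--
--     deg_dict = {anc_id : 0}
--
--     if anc_id in node_dict.get(anc_id,dict()):
--         return deg_dict
--
--     for child_id,deg in node_dict.get(anc_id,{}).items():
--         desc_deg_dict = get_desc_deg_dict(
--             anc_id = child_id,
--             node_dict = node_dict,
--         )
--         desc_deg_dict = {k : v + deg for k,v in desc_deg_dict.items() if k != anc_id}
--         deg_dict.update(desc_deg_dict)
--
--     return deg_dict
-- ===== SOURCE B (Python) =====
-- def get_desc_deg_dict(anc_id, node_dict):
--     """Top-down accumulator DFS: carry the accumulated degree down and write each
--     visited descendant directly into one shared result dict, instead of building,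
--     filtering, shifting and merging a dict per subtree as A does."""
--     deg_dict = {}
--
--     def visit(node, deg):
--         deg_dict[node] = deg
--         children = list(node_dict.get(node, {}).items())
--         if any(c == node for c, _ in children):
--             return
--         for child, d in children:
--             visit(child, deg + d)
--
--     visit(anc_id, 0)
--     return deg_dict
-- ===== Notes on version B (the rewrite author's own statement) =====
-- stated objective: alternative
-- what changed: B replaces A's bottom-up recursion (build each child's descendant dict, then filter, shift every value by the edge degree and merge it into the parent's dict at every level) by a top-down accumulator DFS that carries the accumulated degree and writes each descendant directly into one shared result dict, so no intermediate dicts are built or re-shifted.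
-- outside the precondition, e.g. on get_desc_deg_dict(1, {1: {2: 1}, 2: {1: 1}}): A raises RecursionError, B raises RecursionError
import Mathlib
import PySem

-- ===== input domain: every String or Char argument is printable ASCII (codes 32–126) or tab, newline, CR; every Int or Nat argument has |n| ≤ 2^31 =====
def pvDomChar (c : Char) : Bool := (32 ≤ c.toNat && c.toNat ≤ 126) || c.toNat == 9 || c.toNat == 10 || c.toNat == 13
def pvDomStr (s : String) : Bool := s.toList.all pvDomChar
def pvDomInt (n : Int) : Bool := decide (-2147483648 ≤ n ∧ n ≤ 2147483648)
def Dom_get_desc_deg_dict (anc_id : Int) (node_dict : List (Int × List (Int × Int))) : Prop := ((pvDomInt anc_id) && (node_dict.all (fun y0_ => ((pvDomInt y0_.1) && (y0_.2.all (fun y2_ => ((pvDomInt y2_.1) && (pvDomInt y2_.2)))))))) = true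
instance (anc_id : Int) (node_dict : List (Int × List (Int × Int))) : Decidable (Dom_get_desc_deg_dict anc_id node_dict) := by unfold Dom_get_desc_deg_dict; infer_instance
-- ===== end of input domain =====

-- B replaces A's bottom-up "build, filter, shift and merge a dict per subtree" recursion by a
-- top-down accumulator DFS writing each descendant into one shared dict (objective: alternative).


-- ===== PORT A =====
-- node_dict.get(x, {}) (under Pre_ the association list has no duplicate keys, so dict lookup = first match)
def pvNdget (node_dict : List (Int × List (Int × Int))) (x : Int) : List (Int × Int) :=
  ((PySem.Dict.mk node_dict).get? x).getD []

-- A's recursion, with fuel; under Pre_ the recursion depth is at most node_dict.length + 1,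
-- so the fuel used below never runs out (fuel 0 is unreachable inside Pre_).
def pvGoA (nd : List (Int × List (Int × Int))) : Nat → Int → PySem.Dict Int Int
  | 0, _ => PySem.Dict.empty
  | f+1, x =>
    let cs := pvNdget nd x
    let deg_dict : PySem.Dict Int Int := PySem.Dict.empty.insert x 0
    if (cs.map Prod.fst).contains x then deg_dict
    else cs.foldl (fun dd cd =>
      dd.update (((pvGoA nd f cd.1).items.filter (fun kv => !(kv.1 == x))).map
        (fun kv => (kv.1, kv.2 + cd.2)))) deg_dict

def get_desc_deg_dict (anc_id : Int) (node_dict : List (Int × List (Int × Int))) : List (Int × Int) :=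
  (pvGoA node_dict (node_dict.length + 1) anc_id).items

-- ===== PORT B =====
-- B's accumulator DFS: visit(node, deg) writes deg into the shared dict and, unless the node
-- lists itself as a child, descends into each (child, d) pair in order carrying deg + d.
-- The for-loop over the children list is the mutual helper pvVisitKids; same fuel bound as A.
mutual
def pvVisit (nd : List (Int × List (Int × Int))) : Nat → Int → Int → PySem.Dict Int Int → PySem.Dict Int Int
  | 0, _, _, dd => dd
  | f+1, node, deg, dd =>
    let dd1 := dd.insert node deg
    let children := (PySem.Dict.mk nd).getD node []
    if children.any (fun cd => cd.1 == node) then dd1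
    else pvVisitKids nd f children deg dd1

def pvVisitKids (nd : List (Int × List (Int × Int))) : Nat → List (Int × Int) → Int → PySem.Dict Int Int → PySem.Dict Int Int
  | _, [], _, dd => dd
  | f, cd :: rest, deg, dd => pvVisitKids nd f rest deg (pvVisit nd f cd.1 (deg + cd.2) dd)
end

def get_desc_deg_dict_alt (anc_id : Int) (node_dict : List (Int × List (Int × Int))) : List (Int × Int) :=
  (pvVisit node_dict (node_dict.length + 1) anc_id 0 PySem.Dict.empty).items

-- ===== PRECONDITION & SPEC =====
-- successors of x that A actually recurses into (none when x lists itself as its own child)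
def pvGsucc (nd : List (Int × List (Int × Int))) (x : Int) : List Int :=
  let cs := pvNdget nd x
  if (cs.map Prod.fst).contains x then [] else cs.map Prod.fst

-- nodes reachable from the set s in at most f steps of pvGsucc (monotone BFS closure)
def pvReach (nd : List (Int × List (Int × Int))) : Nat → List Int → List Int
  | 0, s => s
  | f+1, s => pvReach nd f ((s ++ s.flatMap (pvGsucc nd)).dedup)

-- Pre_ excludes (i) association lists with duplicate node keys or duplicate child keys inside one
-- node, which have no Python-dict counterpart (a Python dict cannot hold duplicate keys), and
-- (ii) graphs in which a node REACHABLE FROM anc_id lies on a pvGsucc-cycle not cut by a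
-- self-loop: on exactly those inputs A's recursion never terminates (Python RecursionError).
-- Cycles unreachable from anc_id are inside Pre_ and proved equal.
def Pre_get_desc_deg_dict (anc_id : Int) (node_dict : List (Int × List (Int × Int))) : Prop :=
  (node_dict.map Prod.fst).Nodup ∧
  (∀ p ∈ node_dict, (p.2.map Prod.fst).Nodup) ∧
  (∀ p ∈ node_dict, p.1 ∈ pvReach node_dict (node_dict.length + 1) [anc_id] →
    p.1 ∉ pvReach node_dict node_dict.length (pvGsucc node_dict p.1))
instance (anc_id : Int) (node_dict : List (Int × List (Int × Int))) : Decidable (Pre_get_desc_deg_dict anc_id node_dict) := by unfold Pre_get_desc_deg_dict; infer_instance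

def pvWitness_get_desc_deg_dict : Int × (List (Int × List (Int × Int))) :=
  (1, [(1, [(2, 1), (3, 2)]), (2, [(3, 1)])])

def Spec_get_desc_deg_dict (anc_id : Int) (node_dict : List (Int × List (Int × Int))) (out : List (Int × Int)) : Prop := out = get_desc_deg_dict_alt anc_id node_dict
instance (anc_id : Int) (node_dict : List (Int × List (Int × Int))) (out : List (Int × Int)) : Decidable (Spec_get_desc_deg_dict anc_id node_dict out) := by unfold Spec_get_desc_deg_dict; infer_instance

-- ===== CLAIM (what is proved, stated in full; the proofs are below) =====
def Claim_equal_get_desc_deg_dict : Prop := ∀ (anc_id : Int) (node_dict : List (Int × List (Int × Int))), Dom_get_desc_deg_dict anc_id node_dict → Pre_get_desc_deg_dict anc_id node_dict → Spec_get_desc_deg_dict anc_id node_dict (get_desc_deg_dict anc_id node_dict)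

-- ===== LEMMAS AND PROOFS =====

-- B's membership test over (child, deg) pairs agrees with A's test over the key list
theorem pv_any_eq_contains (cs : List (Int × Int)) (x : Int) :
    cs.any (fun cd => cd.1 == x) = (cs.map Prod.fst).contains x := by
  rw [Bool.eq_iff_iff]
  simp [List.any_eq_true, List.mem_map]

-- B's dict lookup is A's helper
theorem pv_getD_eq_ndget (nd : List (Int × List (Int × Int))) (x : Int) :
    (PySem.Dict.mk nd).getD x [] = pvNdget nd x :=
  PySem.Dict.getD_eq_get?_getD _ _ _

-- shift all values of an items list by t
def pvShift (t : Int) (l : List (Int × Int)) : List (Int × Int) := l.map (fun kv => (kv.1, kv.2 + t))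

theorem pvShift_zero (l : List (Int × Int)) : pvShift 0 l = l := by
  simp [pvShift]

theorem pvShift_shift (t s : Int) (l : List (Int × Int)) :
    pvShift t (pvShift s l) = pvShift (t + s) l := by
  simp only [pvShift, List.map_map]
  apply List.map_congr_left
  intro kv _
  simp [Function.comp]
  ring

theorem pvShift_keys (t : Int) (l : List (Int × Int)) :
    (pvShift t l).map Prod.fst = l.map Prod.fst := by
  simp [pvShift, List.map_map, Function.comp]

theorem pv_update_cons (d : PySem.Dict Int Int) (p : Int × Int) (l : List (Int × Int)) :
    d.update (p :: l) = (d.insert p.1 p.2).update l := rfl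

theorem pv_keys_mk (l : List (Int × Int)) : (PySem.Dict.mk l).keys = l.map Prod.fst := rfl

theorem pv_contains_eq (d : PySem.Dict Int Int) (k : Int) :
    d.contains k = (d.items.map Prod.fst).contains k := by
  rw [PySem.Dict.contains_eq_decide_mem_keys]
  simp [PySem.Dict.keys, List.contains_iff_mem]

-- insert commutes with insert at an existing key
theorem pv_insert_comm (d : PySem.Dict Int Int) (k k1 : Int) (v w : Int)
    (hc : d.contains k = true) (hne : k1 ≠ k) :
    (d.insert k1 w).insert k v = (d.insert k v).insert k1 w := by
  apply PySem.Dict.ext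
  have hc1 : (d.insert k1 w).contains k = true := by
    rw [PySem.Dict.contains_insert]; simp [hc]
  have hc2 : (d.insert k v).contains k1 = d.contains k1 := by
    rw [PySem.Dict.contains_insert]; simp [hne]
  by_cases h1 : d.contains k1 = true
  · rw [PySem.Dict.items_insert ((d.insert k1 w)) k v,
        PySem.Dict.items_insert d k1 w,
        PySem.Dict.items_insert ((d.insert k v)) k1 w,
        PySem.Dict.items_insert d k v]
    simp only [hc1, hc, h1, hc2, if_pos, List.map_map]
    apply List.map_congr_left
    intro p _
    by_cases hp : p.1 = k
    · have hp1 : p.1 ≠ k1 := by rw [hp]; exact Ne.symm hne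
      simp [Function.comp, hp, hp1, hne, Ne.symm hne]
    · by_cases hp1 : p.1 = k1 <;> simp [Function.comp, hp, hp1, hne]
  · have h1' : d.contains k1 = false := by simp at h1; exact h1
    rw [PySem.Dict.items_insert ((d.insert k1 w)) k v,
        PySem.Dict.items_insert d k1 w,
        PySem.Dict.items_insert ((d.insert k v)) k1 w,
        PySem.Dict.items_insert d k v]
    simp only [hc1, hc, h1', hc2, if_pos, if_neg, Bool.false_eq_true, not_false_iff]
    rw [List.map_append]
    simp [hne]

-- insert at a key present in e commutes past an update whose pairs avoid that key
theorem pv_update_insert_comm (l : List (Int × Int)) :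
    ∀ (d : PySem.Dict Int Int) (k v : Int), (∀ p ∈ l, p.1 ≠ k) → d.contains k = true →
    (d.update l).insert k v = (d.insert k v).update l := by
  induction l with
  | nil => intro d k v _ _; rfl
  | cons p l ih =>
    intro d k v hk hc
    rw [pv_update_cons, pv_update_cons]
    have hpk : p.1 ≠ k := hk p (by simp)
    have hc' : (d.insert p.1 p.2).contains k = true := by
      rw [PySem.Dict.contains_insert]; simp [hc]
    rw [ih (d.insert p.1 p.2) k v (fun q hq => hk q (by simp [hq])) hc']
    rw [pv_insert_comm d k p.1 v p.2 hc hpk]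

-- update by a list with key k replaced = update then insert, when k occurs in the list
theorem pv_upd_ins_mem (l : List (Int × Int)) :
    ∀ (e : PySem.Dict Int Int) (k v : Int), (l.map Prod.fst).Nodup → k ∈ l.map Prod.fst →
    e.update (l.map (fun p => if p.1 == k then (k, v) else p)) = (e.update l).insert k v := by
  induction l with
  | nil => intro e k v _ hmem; simp at hmem
  | cons q l ih =>
    intro e k v hnd hmem
    rw [List.map_cons, List.nodup_cons] at hnd
    by_cases h1 : q.1 = k
    · subst h1
      have hknotl : q.1 ∉ l.map Prod.fst := hnd.1
      have hmapid : l.map (fun p => if p.1 == q.1 then (q.1, v) else p) = l.map id := by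
        apply List.map_congr_left
        intro p hp
        have hne : p.1 ≠ q.1 := fun hpk => hknotl (hpk ▸ List.mem_map_of_mem hp)
        simp [hne]
      rw [List.map_cons, hmapid, List.map_id]
      have hq : (if q.1 == q.1 then (q.1, v) else q) = (q.1, v) := by simp
      rw [hq]
      show (e.insert q.1 v).update l = ((e.insert q.1 q.2).update l).insert q.1 v
      rw [pv_update_insert_comm l (e.insert q.1 q.2) q.1 v
            (fun p hp => fun hpk => hknotl (hpk ▸ List.mem_map_of_mem hp))
            (by rw [PySem.Dict.contains_insert]; simp)]
      rw [PySem.Dict.insert_insert_self]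
    · have hmeml : k ∈ l.map Prod.fst := by
        rcases List.mem_cons.mp hmem with h | h
        · exact absurd h.symm h1
        · exact h
      rw [List.map_cons]
      have hq : (if q.1 == k then (k, v) else q) = q := by simp [h1]
      rw [hq]
      show (e.insert q.1 q.2).update (l.map (fun p => if p.1 == k then (k, v) else p))
          = ((e.insert q.1 q.2).update l).insert k v
      exact ih (e.insert q.1 q.2) k v hnd.2 hmeml

-- update by l ++ [(k,v)] = update then insert, when k does not occur in l
theorem pv_upd_ins_notmem (l : List (Int × Int)) :
    ∀ (e : PySem.Dict Int Int) (k v : Int),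
    e.update (l ++ [(k, v)]) = (e.update l).insert k v := by
  induction l with
  | nil => intro e k v; rfl
  | cons q l ih =>
    intro e k v
    rw [List.cons_append]
    show (e.insert q.1 q.2).update (l ++ [(k, v)]) = ((e.insert q.1 q.2).update l).insert k v
    exact ih (e.insert q.1 q.2) k v

-- fold update fusion: (e.update b.items).update l = e.update ((b.update l).items)
theorem pv_upd_upd (l : List (Int × Int)) :
    ∀ (e b : PySem.Dict Int Int), b.keys.Nodup →
    (e.update b.items).update l = e.update ((b.update l).items) := by
  induction l with
  | nil => intro e b _; rfl
  | cons p l ih =>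
    intro e b hnd
    rw [pv_update_cons, pv_update_cons]
    have hndi : (b.items.map Prod.fst).Nodup := hnd
    have hstep : (e.update b.items).insert p.1 p.2 = e.update ((b.insert p.1 p.2).items) := by
      rw [PySem.Dict.items_insert b p.1 p.2]
      by_cases hc : b.contains p.1 = true
      · rw [if_pos hc]
        have hmem : p.1 ∈ b.items.map Prod.fst := by
          rw [pv_contains_eq, List.contains_iff_mem] at hc
          exact hc
        exact (pv_upd_ins_mem b.items e p.1 p.2 hndi hmem).symm
      · have hc' : b.contains p.1 = false := by simp at hc; exact hc
        rw [hc']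
        simp only [Bool.false_eq_true, if_neg, not_false_iff]
        exact (pv_upd_ins_notmem b.items e p.1 p.2).symm
    rw [hstep]
    exact ih e (b.insert p.1 p.2) (PySem.Dict.nodup_keys_insert b p.1 p.2 hnd)

-- shifting values commutes with insert and update (keys are unchanged)
theorem pv_shift_insert (t : Int) (d : PySem.Dict Int Int) (k v : Int) :
    (PySem.Dict.mk (pvShift t d.items)).insert k (v + t) = PySem.Dict.mk (pvShift t (d.insert k v).items) := by
  apply PySem.Dict.ext
  have hck : (PySem.Dict.mk (pvShift t d.items)).contains k = d.contains k := by
    rw [pv_contains_eq, pv_contains_eq]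
    simp [pvShift_keys]
  by_cases hc : d.contains k = true
  · rw [PySem.Dict.items_insert, hck, hc, PySem.Dict.items_insert, hc]
    simp only [if_pos]
    show (pvShift t d.items).map _ = pvShift t (d.items.map _)
    simp only [pvShift, List.map_map]
    apply List.map_congr_left
    intro p _
    by_cases hp : p.1 = k <;> simp [Function.comp, hp]
  · have hc' : d.contains k = false := by simp at hc; simp [hc]
    rw [PySem.Dict.items_insert, hck, hc', PySem.Dict.items_insert, hc']
    simp [pvShift]

theorem pv_shift_update (m : List (Int × Int)) :
    ∀ (t : Int) (d : PySem.Dict Int Int),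
    (PySem.Dict.mk (pvShift t d.items)).update (pvShift t m) = PySem.Dict.mk (pvShift t ((d.update m).items)) := by
  induction m with
  | nil => intro t d; rfl
  | cons p m ih =>
    intro t d
    show ((PySem.Dict.mk (pvShift t d.items)).insert p.1 (p.2 + t)).update (pvShift t m)
        = PySem.Dict.mk (pvShift t (((d.insert p.1 p.2).update m).items))
    rw [pv_shift_insert t d p.1 p.2]
    exact ih t (d.insert p.1 p.2)

-- keys of an update
theorem pv_keys_update (d : PySem.Dict Int Int) (l : List (Int × Int)) :
    (d.update l).keys = PySem.Set.update d.keys (l.map Prod.fst) :=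
  PySem.Dict.keys_foldl_insert_key l Prod.fst (fun _ x => x.2) d

theorem pv_nodup_keys_update (d : PySem.Dict Int Int) (l : List (Int × Int)) (h : d.keys.Nodup) :
    (d.update l).keys.Nodup := by
  rw [pv_keys_update]
  exact PySem.Set.nodup_update _ _ h

theorem pv_items_single (x : Int) : (PySem.Dict.empty.insert x (0:Int)).items = [(x, 0)] := by
  rw [PySem.Dict.items_insert, PySem.Dict.contains_empty]
  rfl

theorem pv_keys_single (x : Int) : (PySem.Dict.empty.insert x (0:Int)).keys = [x] := by
  show ((PySem.Dict.empty.insert x (0:Int)).items).map Prod.fst = [x]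
  rw [pv_items_single]
  rfl

theorem pv_mem_keys (d : PySem.Dict Int Int) (kv : Int × Int) (h : kv ∈ d.items) : kv.1 ∈ d.keys := by
  show kv.1 ∈ d.items.map Prod.fst
  exact List.mem_map_of_mem h

-- ----- reachability lemmas -----

theorem pv_reach_mono (nd : List (Int × List (Int × Int))) :
    ∀ (f : Nat) (s t : List Int), (∀ a ∈ s, a ∈ t) → ∀ a ∈ pvReach nd f s, a ∈ pvReach nd f t := by
  intro f
  induction f with
  | zero => intro s t hst a ha; exact hst a ha
  | succ f ih =>
    intro s t hst a ha
    apply ih _ _ _ a ha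
    intro b hb
    simp only [List.mem_dedup, List.mem_append, List.mem_flatMap] at hb ⊢
    rcases hb with hb | ⟨c, hc, hbc⟩
    · exact Or.inl (hst b hb)
    · exact Or.inr ⟨c, hst c hc, hbc⟩

theorem pv_reach_grow (nd : List (Int × List (Int × Int))) :
    ∀ (f : Nat) (s : List Int) (a : Int), a ∈ s → a ∈ pvReach nd f s := by
  intro f
  induction f with
  | zero => intro s a ha; exact ha
  | succ f ih =>
    intro s a ha
    apply ih
    simp [List.mem_dedup, ha]

theorem pv_reach_fuel_succ (nd : List (Int × List (Int × Int))) :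
    ∀ (f : Nat) (s : List Int) (a : Int), a ∈ pvReach nd f s → a ∈ pvReach nd (f+1) s := by
  intro f
  induction f with
  | zero =>
    intro s a ha
    simp only [pvReach] at ha ⊢
    simp only [List.mem_dedup, List.mem_append]
    exact Or.inl ha
  | succ f ih =>
    intro s a ha
    exact ih _ a ha

theorem pv_reach_fuel (nd : List (Int × List (Int × Int))) (f g : Nat) (hfg : f ≤ g) :
    ∀ (s : List Int) (a : Int), a ∈ pvReach nd f s → a ∈ pvReach nd g s := by
  induction g with
  | zero => intro s a ha; have : f = 0 := Nat.le_zero.mp hfg; exact this ▸ ha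
  | succ g ih =>
    intro s a ha
    rcases Nat.le_succ_iff.mp hfg with h | h
    · exact pv_reach_fuel_succ nd g s a (ih h s a ha)
    · rw [h] at ha; exact ha

-- one pvGsucc step costs one unit of reach fuel
theorem pv_reach_step (nd : List (Int × List (Int × Int))) :
    ∀ (f : Nat) (s : List Int) (a b : Int), a ∈ pvReach nd f s → b ∈ pvGsucc nd a →
    b ∈ pvReach nd (f+1) s := by
  intro f
  induction f with
  | zero =>
    intro s a b ha hb
    show b ∈ pvReach nd 0 ((s ++ s.flatMap (pvGsucc nd)).dedup)
    simp only [pvReach, List.mem_dedup, List.mem_append, List.mem_flatMap]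
    exact Or.inr ⟨a, ha, hb⟩
  | succ f ih =>
    intro s a b ha hb
    exact ih _ a b ha hb

-- every key of pvGoA nd f x is reachable from x in at most f steps
theorem pv_goA_keys_reach (nd : List (Int × List (Int × Int))) :
    ∀ (f : Nat) (x k : Int), k ∈ (pvGoA nd f x).keys → k ∈ pvReach nd f [x] := by
  intro f
  induction f with
  | zero => intro x k hk; simp [pvGoA, PySem.Dict.keys_empty] at hk
  | succ f ih =>
    intro x k hk
    rw [pvGoA] at hk
    by_cases hsl : ((pvNdget nd x).map Prod.fst).contains x = true
    · rw [if_pos hsl] at hk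
      have : k = x := by
        rw [pv_keys_single] at hk
        simpa using hk
      exact this ▸ pv_reach_grow nd (f+1) [x] x (by simp)
    · rw [if_neg hsl] at hk
      -- membership in keys of the fold: k = x or k is a key of some child's result
      have main : ∀ (cl : List (Int × Int)) (acc : PySem.Dict Int Int),
          k ∈ (cl.foldl (fun dd cd => dd.update (((pvGoA nd f cd.1).items.filter (fun kv => !(kv.1 == x))).map (fun kv => (kv.1, kv.2 + cd.2)))) acc).keys →
          k ∈ acc.keys ∨ ∃ cd ∈ cl, k ∈ (pvGoA nd f cd.1).keys := by
        intro cl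
        induction cl with
        | nil => intro acc h; exact Or.inl h
        | cons cd cl ihc =>
          intro acc h
          rcases ihc _ h with h' | ⟨cd', hcd', hk'⟩
          · rw [pv_keys_update] at h'
            rw [PySem.Set.mem_update] at h'
            rcases h' with h' | h'
            · exact Or.inl h'
            · right
              refine ⟨cd, by simp, ?_⟩
              simp only [List.map_map, List.mem_map, List.mem_filter] at h'
              obtain ⟨kv, ⟨hkv, _⟩, hkeq⟩ := h'
              have : k = kv.1 := by simpa [Function.comp] using hkeq.symm
              subst this
              exact pv_mem_keys _ _ hkv
          · exact Or.inr ⟨cd', by simp [hcd'], hk'⟩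
      rcases main (pvNdget nd x) _ hk with h | ⟨cd, hcd, hk'⟩
      · have hkx : k = x := by
          rw [pv_keys_single] at h
          simpa using h
        exact hkx ▸ pv_reach_grow nd (f+1) [x] x (by simp)
      · have hc1 : cd.1 ∈ pvGsucc nd x := by
          simp only [pvGsucc, if_neg hsl]
          exact List.mem_map_of_mem hcd
        have hstep : ∀ a ∈ pvReach nd f [cd.1], a ∈ pvReach nd (f+1) [x] := by
          intro a ha
          show a ∈ pvReach nd f (([x] ++ [x].flatMap (pvGsucc nd)).dedup)
          apply pv_reach_mono nd f [cd.1]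
          · intro b hb
            simp only [List.mem_singleton] at hb
            subst hb
            simp only [List.mem_dedup, List.mem_append, List.mem_flatMap]
            exact Or.inr ⟨x, by simp, hc1⟩
          · exact ha
        exact hstep k (ih cd.1 k hk')

-- under Pre_, the filter inside A never removes anything below a REACHABLE node x:
-- x never reappears below its own children
theorem pv_filter_id (anc : Int) (nd : List (Int × List (Int × Int)))
    (hnd : (nd.map Prod.fst).Nodup)
    (hpre : ∀ p ∈ nd, p.1 ∈ pvReach nd (nd.length + 1) [anc] →
      p.1 ∉ pvReach nd nd.length (pvGsucc nd p.1))
    (f : Nat) (hf : f ≤ nd.length) (x : Int)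
    (hxr : x ∈ pvReach nd (nd.length + 1) [anc])
    (hsl : ((pvNdget nd x).map Prod.fst).contains x = false)
    (cd : Int × Int) (hcd : cd ∈ pvNdget nd x) :
    x ∉ (pvGoA nd f cd.1).keys := by
  intro hx
  have hreach : x ∈ pvReach nd f [cd.1] := pv_goA_keys_reach nd f cd.1 x hx
  have hcs : pvNdget nd x ≠ [] := by
    intro h; rw [h] at hcd; exact absurd hcd (List.not_mem_nil)
  have hget : (PySem.Dict.mk nd).get? x = some (pvNdget nd x) := by
    cases h : (PySem.Dict.mk nd).get? x with
    | none => exfalso; apply hcs; unfold pvNdget; rw [h]; rfl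
    | some cs => unfold pvNdget; rw [h]; rfl
  have hmem : (x, pvNdget nd x) ∈ nd := by
    have := (PySem.Dict.get?_eq_some_iff_mem_items (PySem.Dict.mk nd) x (pvNdget nd x) hnd).mp hget
    exact this
  have hsub : ∀ a ∈ ([cd.1] : List Int), a ∈ pvGsucc nd x := by
    intro a ha
    simp only [List.mem_singleton] at ha
    subst ha
    show cd.1 ∈ (if ((pvNdget nd x).map Prod.fst).contains x = true then [] else (pvNdget nd x).map Prod.fst)
    rw [if_neg (by rw [hsl]; simp)]
    exact List.mem_map_of_mem hcd
  have : x ∈ pvReach nd nd.length (pvGsucc nd x) :=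
    pv_reach_mono nd nd.length _ _ hsub x (pv_reach_fuel nd f nd.length hf [cd.1] x hreach)
  exact hpre (x, pvNdget nd x) hmem hxr this

-- Nodup keys of A's result
theorem pv_goA_nodup (nd : List (Int × List (Int × Int))) :
    ∀ (f : Nat) (x : Int), (pvGoA nd f x).keys.Nodup := by
  intro f
  induction f with
  | zero => intro x; simp [pvGoA, PySem.Dict.keys_empty]
  | succ f ih =>
    intro x
    rw [pvGoA]
    by_cases hsl : ((pvNdget nd x).map Prod.fst).contains x = true
    · rw [if_pos hsl]
      exact PySem.Dict.nodup_keys_insert _ _ _ (by simp [PySem.Dict.keys_empty])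
    · rw [if_neg hsl]
      have : ∀ (cl : List (Int × Int)) (acc : PySem.Dict Int Int), acc.keys.Nodup →
          (cl.foldl (fun dd cd => dd.update (((pvGoA nd f cd.1).items.filter (fun kv => !(kv.1 == x))).map (fun kv => (kv.1, kv.2 + cd.2)))) acc).keys.Nodup := by
        intro cl
        induction cl with
        | nil => intro acc h; exact h
        | cons cd cl ihc => intro acc h; exact ihc _ (pv_nodup_keys_update _ _ h)
      exact this _ _ (PySem.Dict.nodup_keys_insert _ _ _ (by simp [PySem.Dict.keys_empty]))

-- main invariant: B's DFS into `out` at a node reachable from anc equals `out` updated by the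
-- deg-shifted items of A's result at that node (fuel tracked against depth of reachability)
theorem pv_main (anc : Int) (nd : List (Int × List (Int × Int)))
    (hnd : (nd.map Prod.fst).Nodup)
    (hpre : ∀ p ∈ nd, p.1 ∈ pvReach nd (nd.length + 1) [anc] →
      p.1 ∉ pvReach nd nd.length (pvGsucc nd p.1)) :
    ∀ (f : Nat), f ≤ nd.length + 1 → ∀ (x deg : Int) (out : PySem.Dict Int Int),
    x ∈ pvReach nd (nd.length + 1 - f) [anc] →
    pvVisit nd f x deg out = out.update (pvShift deg (pvGoA nd f x).items) := by
  intro f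
  induction f with
  | zero => intro _ x deg out _; simp only [pvVisit]; rfl
  | succ f ih =>
    intro hf x deg out hx
    have hf' : f ≤ nd.length := Nat.le_of_succ_le_succ hf
    have hxlift : x ∈ pvReach nd (nd.length + 1) [anc] :=
      pv_reach_fuel nd _ _ (Nat.sub_le _ _) [anc] x hx
    rw [pvGoA, pvVisit]
    simp only [pv_getD_eq_ndget, pv_any_eq_contains]
    by_cases hsl : ((pvNdget nd x).map Prod.fst).contains x = true
    · rw [if_pos hsl, if_pos hsl]
      rw [pv_items_single]
      show out.insert x deg = out.insert x (0 + deg)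
      rw [zero_add]
    · rw [if_neg hsl, if_neg hsl]
      -- reach fuel accounting: children of x live one step deeper
      have hxd : x ∈ pvReach nd (nd.length - f) [anc] := by
        have : nd.length + 1 - (f + 1) = nd.length - f := by omega
        rwa [this] at hx
      have hchild : ∀ cd ∈ pvNdget nd x, cd.1 ∈ pvReach nd (nd.length + 1 - f) [anc] := by
        intro cd hcd
        have hsucc : cd.1 ∈ pvGsucc nd x := by
          simp only [pvGsucc, if_neg hsl]
          exact List.mem_map_of_mem hcd
        have := pv_reach_step nd (nd.length - f) [anc] x cd.1 hxd hsucc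
        have heq : nd.length - f + 1 = nd.length + 1 - f := by omega
        rwa [heq] at this
      have hfold : ∀ (cl : List (Int × Int)), (∀ cd ∈ cl, cd ∈ pvNdget nd x) →
          ∀ (acc : PySem.Dict Int Int), acc.keys.Nodup →
          pvVisitKids nd f cl deg (out.update (pvShift deg acc.items))
            = out.update (pvShift deg ((cl.foldl (fun dd cd => dd.update (((pvGoA nd f cd.1).items.filter (fun kv => !(kv.1 == x))).map (fun kv => (kv.1, kv.2 + cd.2)))) acc).items)) := by
        intro cl
        induction cl with
        | nil => intro _ acc _; simp only [pvVisitKids]; rfl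
        | cons cd cl ihc =>
          intro hcl acc hacc
          have hcdmem : cd ∈ pvNdget nd x := hcl cd (by simp)
          have hfid : x ∉ (pvGoA nd f cd.1).keys :=
            pv_filter_id anc nd hnd hpre f hf' x hxlift (by simpa using hsl) cd hcdmem
          -- the filter is the identity
          have hfilter : (pvGoA nd f cd.1).items.filter (fun kv => !(kv.1 == x)) = (pvGoA nd f cd.1).items := by
            apply List.filter_eq_self.mpr
            intro kv hkv
            have : kv.1 ≠ x := by
              intro h
              exact hfid (h ▸ pv_mem_keys _ _ hkv)
            simp [this]
          -- shifted child items
          have hmapshift : ((pvGoA nd f cd.1).items.filter (fun kv => !(kv.1 == x))).map (fun kv => (kv.1, kv.2 + cd.2)) = pvShift cd.2 (pvGoA nd f cd.1).items := by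
            rw [hfilter]; rfl
          rw [pvVisitKids]
          simp only [List.foldl_cons]
          rw [ih (Nat.le_succ_of_le hf') cd.1 (deg + cd.2) (out.update (pvShift deg acc.items))
              (hchild cd hcdmem)]
          have hkey : (out.update (pvShift deg acc.items)).update (pvShift (deg + cd.2) (pvGoA nd f cd.1).items)
              = out.update (pvShift deg ((acc.update (pvShift cd.2 (pvGoA nd f cd.1).items)).items)) := by
            have hb : (PySem.Dict.mk (pvShift deg acc.items)).keys.Nodup := by
              rw [pv_keys_mk, pvShift_keys]
              exact hacc
            have h1 : (out.update ((PySem.Dict.mk (pvShift deg acc.items)).items)).update (pvShift deg (pvShift cd.2 (pvGoA nd f cd.1).items))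
                = out.update (((PySem.Dict.mk (pvShift deg acc.items)).update (pvShift deg (pvShift cd.2 (pvGoA nd f cd.1).items))).items) :=
              pv_upd_upd _ out _ hb
            rw [pv_shift_update _ deg acc] at h1
            have h2 : pvShift deg (pvShift cd.2 (pvGoA nd f cd.1).items) = pvShift (deg + cd.2) (pvGoA nd f cd.1).items :=
              pvShift_shift deg cd.2 _
            rw [h2] at h1
            exact h1
          rw [hkey, hmapshift]
          exact ihc (fun q hq => hcl q (by simp [hq])) (acc.update (pvShift cd.2 (pvGoA nd f cd.1).items))
            (pv_nodup_keys_update _ _ hacc)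
      have hdeg0 : out.insert x deg = out.update (pvShift deg ((PySem.Dict.empty.insert x (0:Int)).items)) := by
        rw [pv_items_single]
        show out.insert x deg = out.insert x (0 + deg)
        rw [zero_add]
      have hdeg0nodup : (PySem.Dict.empty.insert x (0:Int)).keys.Nodup :=
        PySem.Dict.nodup_keys_insert _ _ _ (by simp [PySem.Dict.keys_empty])
      calc pvVisitKids nd f (pvNdget nd x) deg (out.insert x deg)
          = pvVisitKids nd f (pvNdget nd x) deg (out.update (pvShift deg ((PySem.Dict.empty.insert x (0:Int)).items))) := by rw [hdeg0]
        _ = _ := hfold (pvNdget nd x) (fun _ h => h) _ hdeg0nodup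

-- an update of the empty dict with Nodup keys reproduces the list as items
theorem pv_empty_update (l : List (Int × Int)) (hnd : (l.map Prod.fst).Nodup) :
    ((PySem.Dict.empty : PySem.Dict Int Int).update l).items = l := by
  have h := PySem.Dict.items_foldl_insert_fresh (d := (PySem.Dict.empty : PySem.Dict Int Int))
    (l := l) (k := Prod.fst) (v := Prod.snd)
    (by intro a _; exact PySem.Dict.contains_empty _) hnd
  have h0 : (PySem.Dict.empty : PySem.Dict Int Int).items = [] := rfl
  show (l.foldl (fun d a => d.insert a.1 a.2) (PySem.Dict.empty : PySem.Dict Int Int)).items = l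
  rw [h, h0]
  simp

-- ===== VERDICT (by name: the statement is the Claim_ definition above) =====
theorem get_desc_deg_dict_spec : Claim_equal_get_desc_deg_dict := by
  intro anc nd _ hpre
  obtain ⟨h1, _, h3⟩ := hpre
  show get_desc_deg_dict anc nd = get_desc_deg_dict_alt anc nd
  unfold get_desc_deg_dict get_desc_deg_dict_alt
  have hanc : anc ∈ pvReach nd (nd.length + 1 - (nd.length + 1)) [anc] := by
    rw [Nat.sub_self]
    simp [pvReach]
  rw [pv_main anc nd h1 h3 (nd.length + 1) (le_refl _) anc 0 PySem.Dict.empty hanc]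
  rw [pvShift_zero]
  rw [pv_empty_update _ (pv_goA_nodup nd _ anc)]
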